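-- pv_equiv track=rewrite | github.com/darkha03/MyCount | backend/routes/plans/helpers.py | validate_participant_name_list
-- ===== SOURCE A (Python) =====
-- from typing import List, Tuple, Optional
--
-- def validate_participant_name_list(participants: List[str]) -> Tuple[bool, Optional[str]]:
--     """Validate a list of participant names (used by add_plan).
--
--     Returns (True, None) on success or (False, error_message) on failure.
--     Validation: must be a list of non-empty strings, names unique (case-insensitive).
--     """
--     if not isinstance(participants, list):
--         return False, "Participants must be a list"
--     norm_names = []
--     for i, n in enumerate(participants):
--         if not isinstance(n, str) or not n.strip():
--             return False, f"Participant names must be non-empty strings (index {i})"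
--         norm_names.append(n.strip().lower())
--     if len(set(norm_names)) != len(norm_names):
--         return False, "Duplicate participant names detected"
--     return True, None
-- ===== SOURCE B (Python) =====
-- def validate_participant_name_list(participants):
--     if not isinstance(participants, list):
--         return False, "Participants must be a list"
--     bad = next((i for i, n in enumerate(participants)
--                 if not isinstance(n, str) or not n.strip()), None)
--     if bad is not None:
--         return False, f"Participant names must be non-empty strings (index {bad})"
--     keys = sorted(n.strip().lower() for n in participants)
--     if any(a == b for a, b in zip(keys, keys[1:])):
--         return False, "Duplicate participant names detected"
--     return True, None
-- ===== Notes on version B (the rewrite author's own statement) =====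
-- stated objective: alternative
-- what changed: B finds the first invalid name with a next()/generator search instead of A's accumulating validation loop, and detects duplicates by SORTING the normalized names and scanning for an equal adjacent pair (sort-then-scan) instead of A's hash-set whole-collection len(set(...)) != len(...) comparison.
import Mathlib
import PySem

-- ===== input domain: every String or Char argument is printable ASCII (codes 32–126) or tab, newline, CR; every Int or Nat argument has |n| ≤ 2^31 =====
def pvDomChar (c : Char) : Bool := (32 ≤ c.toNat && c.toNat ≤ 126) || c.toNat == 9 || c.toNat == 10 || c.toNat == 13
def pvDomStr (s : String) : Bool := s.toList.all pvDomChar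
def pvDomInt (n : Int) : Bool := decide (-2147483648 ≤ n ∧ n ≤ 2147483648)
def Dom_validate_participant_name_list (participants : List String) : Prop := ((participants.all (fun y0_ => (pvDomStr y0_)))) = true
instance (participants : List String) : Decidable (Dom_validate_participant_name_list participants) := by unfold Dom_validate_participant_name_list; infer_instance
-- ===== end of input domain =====

-- B replaces A's accumulate-then-set-size-compare with a generator-style first-invalid search plus a sort-then-adjacent-scan duplicate check (objective: alternative).

-- ===== PORT A =====
def pvErrMsgA (i : Nat) : String :=
  "Participant names must be non-empty strings (index " ++ PySem.Int.toStr (Int.ofNat i) ++ ")"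

-- A's for-loop: returns the error (Sum.inl) at the first blank name, else (Sum.inr) the normalized list
def pvLoopA (i : Nat) : List String → (Bool × Option String) ⊕ List String
  | [] => Sum.inr []
  | n :: rest =>
    if PySem.Str.strip n = "" then Sum.inl (false, some (pvErrMsgA i))
    else
      match pvLoopA (i + 1) rest with
      | Sum.inl e => Sum.inl e
      | Sum.inr ns => Sum.inr (PySem.Str.lower (PySem.Str.strip n) :: ns)

def validate_participant_name_list (participants : List String) : Bool × Option String :=
  match pvLoopA 0 participants with
  | Sum.inl e => e
  | Sum.inr norm_names =>
    if (PySem.Set.ofList norm_names).length ≠ norm_names.length then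
      (false, some "Duplicate participant names detected")
    else (true, none)

-- ===== PORT B =====
-- any(a == b for a, b in zip(keys, keys[1:])): scan for an equal adjacent pair
def pvHasAdjDup : List String → Bool
  | a :: b :: t => a == b || pvHasAdjDup (b :: t)
  | _ => false

def validate_participant_name_list_alt (participants : List String) : Bool × Option String :=
  -- next((i for i, n in enumerate(participants) if not n.strip()), None)
  match participants.findIdx? (fun n => PySem.Str.strip n == "") with
  | some bad =>
    (false, "Participant names must be non-empty strings (index " ++ PySem.Int.toStr (Int.ofNat bad) ++ ")")
  | none =>
    let keys := PySem.List.sorted (participants.map (fun n => PySem.Str.lower (PySem.Str.strip n))) (fun x => x) false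
    if pvHasAdjDup keys then (false, some "Duplicate participant names detected")
    else (true, none)

-- ===== PRECONDITION & SPEC =====
def Spec_validate_participant_name_list (participants : List String) (out : Bool × Option String) : Prop := out = validate_participant_name_list_alt participants
instance (participants : List String) (out : Bool × Option String) : Decidable (Spec_validate_participant_name_list participants out) := by unfold Spec_validate_participant_name_list; infer_instance

-- ===== CLAIM (what is proved, stated in full; the proofs are below) =====
def Claim_equal_validate_participant_name_list : Prop := ∀ (participants : List String), Dom_validate_participant_name_list participants → Spec_validate_participant_name_list participants (validate_participant_name_list participants)

-- ===== LEMMAS AND PROOFS =====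

-- A's loop characterized by findIdx? of the blank predicate
theorem pvLoopA_eq (l : List String) (i : Nat) :
    pvLoopA i l =
      match l.findIdx? (fun n => PySem.Str.strip n == "") with
      | some j => Sum.inl (false, some (pvErrMsgA (i + j)))
      | none => Sum.inr (l.map (fun n => PySem.Str.lower (PySem.Str.strip n))) := by
  induction l generalizing i with
  | nil => simp [pvLoopA]
  | cons n rest ih =>
    by_cases h : PySem.Str.strip n = ""
    · simp [pvLoopA, h, List.findIdx?_cons]
    · simp only [pvLoopA, h, if_false, List.findIdx?_cons, beq_iff_eq, ih (i + 1)]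
      cases hf : rest.findIdx? (fun n => PySem.Str.strip n == "") with
      | none => simp
      | some j =>
        simp only [Option.map_some]
        have e : i + 1 + j = i + (j + 1) := by omega
        simp [e]

-- PySem.Set.ofList is a sublist of its argument (with a general seed)
theorem pvFoldlAdd_sublist (l : List String) (s : PySem.Set String) :
    ∃ t, l.foldl PySem.Set.add s = s ++ t ∧ t.Sublist l := by
  induction l generalizing s with
  | nil => exact ⟨[], by simp, List.Sublist.refl _⟩
  | cons x xs ih =>
    simp only [List.foldl_cons]
    by_cases h : x ∈ s
    · obtain ⟨t, ht, hs⟩ := ih s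
      rw [PySem.Set.add_of_mem h]
      exact ⟨t, ht, hs.cons x⟩
    · obtain ⟨t, ht, hs⟩ := ih (s ++ [x])
      rw [PySem.Set.add_of_not_mem h, ht]
      exact ⟨x :: t, by simp, hs.cons₂ x⟩

theorem pvOfList_length_eq_iff (l : List String) :
    (PySem.Set.ofList l).length = l.length ↔ l.Nodup := by
  constructor
  · intro h
    obtain ⟨t, ht, hs⟩ := pvFoldlAdd_sublist l []
    have he : PySem.Set.ofList l = t := by rw [PySem.Set.ofList_eq_foldl, ht]; simp
    have ht' : t = l := hs.eq_of_length (by rw [← he]; exact h)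
    have hn := PySem.Set.nodup_ofList l
    rw [he, ht'] at hn; exact hn
  · intro h; rw [PySem.Set.ofList_eq_self_of_nodup l h]

-- the adjacent scan is Chain' (· ≠ ·)
theorem pvHasAdjDup_eq_false_iff (l : List String) :
    pvHasAdjDup l = false ↔ l.IsChain (· ≠ ·) := by
  induction l with
  | nil => simp [pvHasAdjDup]
  | cons a t ih =>
    cases t with
    | nil => simp [pvHasAdjDup, List.isChain_singleton a]
    | cons b t' =>
      simp only [pvHasAdjDup, Bool.or_eq_false_iff, beq_eq_false_iff_ne, ih,
        List.isChain_cons_cons]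

-- on a ≤-sorted list, pairwise-distinct is the same as adjacent-distinct
theorem pvChainLt (l : List String) (hle : l.IsChain (· ≤ ·)) (h : l.IsChain (· ≠ ·)) :
    l.IsChain (· < ·) := by
  induction l with
  | nil => exact List.isChain_nil
  | cons a t ih =>
    cases t with
    | nil => exact List.isChain_singleton a
    | cons b t' =>
      rw [List.isChain_cons_cons] at h hle ⊢
      exact ⟨lt_of_le_of_ne hle.1 h.1, ih hle.2 h.2⟩

theorem pvNodup_iff_chain'_ne (l : List String) (hs : l.Pairwise (· ≤ ·)) :
    l.Nodup ↔ l.IsChain (· ≠ ·) := by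
  constructor
  · intro h; exact List.Pairwise.isChain h
  · intro h
    exact (List.isChain_iff_pairwise.mp (pvChainLt l (List.Pairwise.isChain hs) h)).imp ne_of_lt

-- ===== VERDICT (by name: the statement is the Claim_ definition above) =====
theorem validate_participant_name_list_spec : Claim_equal_validate_participant_name_list := by
  intro participants _
  unfold Spec_validate_participant_name_list validate_participant_name_list validate_participant_name_list_alt
  rw [pvLoopA_eq]
  cases hf : participants.findIdx? (fun n => PySem.Str.strip n == "") with
  | some j => simp [pvErrMsgA]
  | none =>
    simp only
    set keys := participants.map (fun n => PySem.Str.lower (PySem.Str.strip n)) with hk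
    have hperm := PySem.List.sorted_perm keys (fun x => x) false
    have hpw : (PySem.List.sorted keys (fun x => x) false).Pairwise (· ≤ ·) := by
      simpa using PySem.List.sorted_pairwise keys (fun x => x)
    have hiff : (PySem.Set.ofList keys).length = keys.length ↔
        pvHasAdjDup (PySem.List.sorted keys (fun x => x) false) = false := by
      rw [pvOfList_length_eq_iff, pvHasAdjDup_eq_false_iff,
        ← pvNodup_iff_chain'_ne _ hpw, hperm.nodup_iff]
    by_cases h : pvHasAdjDup (PySem.List.sorted keys (fun x => x) false) = true
    · rw [if_pos (by rw [Ne]; intro he; rw [hiff.mp he] at h; simp at h), if_pos h]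
    · rw [if_neg (by rw [Ne, not_not]; exact hiff.mpr (by simpa using h)), if_neg h]
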